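-- pv_equiv track=rewrite | github.com/owasp-dep-scan/dep-scan | packages/analysis-lib/src/analysis_lib/utils.py | get_lifecycle
-- ===== SOURCE A (Python) =====
-- def get_lifecycle(lifecycles):
--     lifecycle_mode = "pre-build"
--     if not lifecycles or not isinstance(lifecycles, list):
--         return "pre-build"
--     for l in lifecycles:
--         phase = l.get("phase", "")
--         if phase == "build":
--             lifecycle_mode = "build"
--         if phase == "post-build":
--             lifecycle_mode = "post-build"
--             break
--     return lifecycle_mode
-- ===== SOURCE B (Python) =====
-- def get_lifecycle(lifecycles):
--     if not lifecycles or not isinstance(lifecycles, list):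
--         return "pre-build"
--     if any(l.get("phase", "") == "post-build" for l in lifecycles):
--         return "post-build"
--     if any(l.get("phase", "") == "build" for l in lifecycles):
--         return "build"
--     return "pre-build"
-- ===== Notes on version B (the rewrite author's own statement) =====
-- stated objective: idiomatic
-- what changed: Replaced the single accumulator loop with early break by two ordered short-circuiting any() scans (post-build first, then build), eliminating the mutable mode variable.
import Mathlib
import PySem

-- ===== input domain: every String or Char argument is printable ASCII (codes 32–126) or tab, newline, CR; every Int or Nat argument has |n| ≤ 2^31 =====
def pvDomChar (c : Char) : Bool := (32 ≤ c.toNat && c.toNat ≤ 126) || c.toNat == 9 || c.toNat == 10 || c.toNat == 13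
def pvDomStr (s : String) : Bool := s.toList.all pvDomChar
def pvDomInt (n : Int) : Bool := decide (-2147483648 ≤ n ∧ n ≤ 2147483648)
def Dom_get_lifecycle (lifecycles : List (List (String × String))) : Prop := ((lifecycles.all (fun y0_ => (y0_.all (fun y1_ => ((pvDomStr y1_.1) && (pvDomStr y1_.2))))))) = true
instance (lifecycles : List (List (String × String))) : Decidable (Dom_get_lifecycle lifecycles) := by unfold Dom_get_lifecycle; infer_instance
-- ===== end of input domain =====

-- B replaces A's accumulator loop (early break on post-build) with two ordered short-circuiting scans; idiomatic, same cost.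


-- ===== PORT A =====
-- loop of A: accumulator `mode`, early break on post-build
def get_lifecycle_go (xs : List (List (String × String))) (mode : String) : String :=
  match xs with
  | [] => mode
  | l :: rest =>
    let phase := (PySem.Dict.mk l).getD "phase" ""
    let mode' := if phase = "build" then "build" else mode
    if phase = "post-build" then "post-build" else get_lifecycle_go rest mode'

def get_lifecycle (lifecycles : List (List (String × String))) : String :=
  if lifecycles = [] then "pre-build"
  else get_lifecycle_go lifecycles "pre-build"

-- ===== PORT B =====
def get_lifecycle_alt (lifecycles : List (List (String × String))) : String :=
  if lifecycles = [] then "pre-build"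
  else if lifecycles.any (fun l => (PySem.Dict.mk l).getD "phase" "" == "post-build") then "post-build"
  else if lifecycles.any (fun l => (PySem.Dict.mk l).getD "phase" "" == "build") then "build"
  else "pre-build"

-- ===== PRECONDITION & SPEC =====
def Spec_get_lifecycle (lifecycles : List (List (String × String))) (out : String) : Prop := out = get_lifecycle_alt lifecycles
instance (lifecycles : List (List (String × String))) (out : String) : Decidable (Spec_get_lifecycle lifecycles out) := by unfold Spec_get_lifecycle; infer_instance

-- ===== CLAIM (what is proved, stated in full; the proofs are below) =====
def Claim_equal_get_lifecycle : Prop := ∀ (lifecycles : List (List (String × String))), Dom_get_lifecycle lifecycles → Spec_get_lifecycle lifecycles (get_lifecycle lifecycles)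

-- ===== LEMMAS AND PROOFS =====

-- ===== VERDICT (by name: the statement is the Claim_ definition above) =====
lemma get_lifecycle_go_eq (xs : List (List (String × String))) (mode : String) :
    get_lifecycle_go xs mode =
      if xs.any (fun l => (PySem.Dict.mk l).getD "phase" "" == "post-build") then "post-build"
      else if xs.any (fun l => (PySem.Dict.mk l).getD "phase" "" == "build") then "build"
      else mode := by
  induction xs generalizing mode with
  | nil => simp [get_lifecycle_go]
  | cons l rest ih =>
    simp only [get_lifecycle_go, List.any_cons]
    by_cases hp : (PySem.Dict.mk l).getD "phase" "" = "post-build"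
    · simp [hp]
    · by_cases hb : (PySem.Dict.mk l).getD "phase" "" = "build" <;> simp [hp, hb, ih]

theorem get_lifecycle_spec : Claim_equal_get_lifecycle := by
  intro xs _
  unfold Spec_get_lifecycle get_lifecycle get_lifecycle_alt
  by_cases h : xs = []
  · simp [h]
  · simp only [h, if_false, get_lifecycle_go_eq]
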